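-- pv_equiv track=rewrite | github.com/CodeCraftCurriculum-I/module_9 | code/python/advenure.py | extractSubject
-- ===== SOURCE A (Python) =====
-- def extractSubject(userInput, possibleSubjects):
--     segments = userInput.split(" ")
--     subject = None
--     for sub in possibleSubjects:
--         for segment in segments:
--             if segment == sub:
--                 subject = sub
--                 break
--
--     return subject
-- ===== SOURCE B (Python) =====
-- def extractSubject(userInput, possibleSubjects):
--     segments = userInput.split(" ")
--     for sub in reversed(list(possibleSubjects)):
--         if sub in segments:
--             return sub
--     return None
-- ===== Notes on version B (the rewrite author's own statement) =====
-- stated objective: simpler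
-- what changed: Replaces the forward full scan that overwrites the result on every later match with a single reverse scan over possibleSubjects that returns the first subject contained in the split segments (early return instead of accumulate-last).
import Mathlib
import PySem

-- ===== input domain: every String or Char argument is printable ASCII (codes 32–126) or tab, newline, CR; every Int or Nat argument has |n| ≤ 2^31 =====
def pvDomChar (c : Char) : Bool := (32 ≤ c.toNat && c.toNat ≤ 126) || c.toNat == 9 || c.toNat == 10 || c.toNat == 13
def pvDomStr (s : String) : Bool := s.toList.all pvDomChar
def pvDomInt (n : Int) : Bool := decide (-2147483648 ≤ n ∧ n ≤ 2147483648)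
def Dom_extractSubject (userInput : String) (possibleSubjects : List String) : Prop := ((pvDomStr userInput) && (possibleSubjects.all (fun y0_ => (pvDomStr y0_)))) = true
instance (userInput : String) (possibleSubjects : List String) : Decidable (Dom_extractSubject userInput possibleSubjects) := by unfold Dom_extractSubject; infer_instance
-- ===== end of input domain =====

-- B changes A's forward overwrite-last scan into a reverse scan with early return (objective: simpler).

-- ===== PORT A =====
-- inner 'for segment in segments: if segment == sub: subject = sub; break'
def extractSubjectInner (segments : List String) (sub : String) (subject : Option String) : Option String :=
  match segments with
  | [] => subject
  | seg :: rest => if seg == sub then some sub else extractSubjectInner rest sub subject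

def extractSubject (userInput : String) (possibleSubjects : List String) : Option String :=
  let segments := (PySem.Str.split? userInput " ").getD []  -- sep is the non-empty literal " ", split? is always some
  possibleSubjects.foldl (fun subject sub => extractSubjectInner segments sub subject) none

-- ===== PORT B =====
def extractSubject_alt (userInput : String) (possibleSubjects : List String) : Option String :=
  let segments := (PySem.Str.split? userInput " ").getD []  -- sep is the non-empty literal " ", split? is always some
  possibleSubjects.reverse.find? (fun sub => segments.contains sub)

-- ===== PRECONDITION & SPEC =====
def Spec_extractSubject (userInput : String) (possibleSubjects : List String) (out : Option String) : Prop := out = extractSubject_alt userInput possibleSubjects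
instance (userInput : String) (possibleSubjects : List String) (out : Option String) : Decidable (Spec_extractSubject userInput possibleSubjects out) := by unfold Spec_extractSubject; infer_instance

-- ===== CLAIM (what is proved, stated in full; the proofs are below) =====
def Claim_equal_extractSubject : Prop := ∀ (userInput : String) (possibleSubjects : List String), Dom_extractSubject userInput possibleSubjects → Spec_extractSubject userInput possibleSubjects (extractSubject userInput possibleSubjects)

-- ===== LEMMAS AND PROOFS =====

-- the inner scan is a containment test
theorem extractSubjectInner_eq (segments : List String) (sub : String) (subject : Option String) :
    extractSubjectInner segments sub subject =
      if segments.contains sub then some sub else subject := by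
  induction segments with
  | nil => simp [extractSubjectInner]
  | cons seg rest ih =>
      by_cases h : seg = sub
      · subst h; simp [extractSubjectInner]
      · simp [extractSubjectInner, ih, h, Ne.symm h]

-- overwrite-last foldl equals reverse find? (or'd with the initial accumulator)
theorem foldl_overwrite_eq_reverse_find {α : Type} (p : α → Bool) (l : List α) (acc : Option α) :
    l.foldl (fun s x => if p x then some x else s) acc =
      (l.reverse.find? p).or acc := by
  induction l generalizing acc with
  | nil => simp
  | cons x l ih =>
      simp only [List.foldl_cons, List.reverse_cons, List.find?_append, ih]
      cases hf : l.reverse.find? p with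
      | some y => simp
      | none =>
          simp only [Option.or]
          cases hp : p x <;> simp [List.find?, hp]

-- ===== VERDICT (by name: the statement is the Claim_ definition above) =====
theorem extractSubject_spec : Claim_equal_extractSubject := by
  intro userInput possibleSubjects _
  unfold Spec_extractSubject extractSubject extractSubject_alt
  simp only [extractSubjectInner_eq, foldl_overwrite_eq_reverse_find, Option.or_none]
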